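-- pv_equiv track=rewrite | github.com/Watesoyan/Leetcode | Solutions/#684. Redundant Connection.py | find
-- ===== SOURCE A (Python) =====
-- def find(root, x):
--     val = root.get(x)
--     if val is None:
--         root[x] = x
--         return x, 0
--     else:
--         n = 0
--         while x != val:
--             x = root[x]
--             val = root[x]
--             n += 1
--         return x, n
-- ===== SOURCE B (Python) =====
-- def find(root, x):
--     if x not in root:
--         root[x] = x
--         return x, 0
--     return _walk(root, x)
--
--
-- def _walk(root, x):
--     val = root[x]
--     if x == val:
--         return x, 0
--     r, n = _walk(root, val)
--     return r, n + 1
-- ===== Notes on version B (the rewrite author's own statement) =====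
-- stated objective: simpler
-- what changed: A's single function with a while-loop carrying (x, val, n) state is replaced by a membership-check wrapper plus a structural recursion _walk on the parent chain that returns (root, hops) directly.
import Mathlib
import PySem

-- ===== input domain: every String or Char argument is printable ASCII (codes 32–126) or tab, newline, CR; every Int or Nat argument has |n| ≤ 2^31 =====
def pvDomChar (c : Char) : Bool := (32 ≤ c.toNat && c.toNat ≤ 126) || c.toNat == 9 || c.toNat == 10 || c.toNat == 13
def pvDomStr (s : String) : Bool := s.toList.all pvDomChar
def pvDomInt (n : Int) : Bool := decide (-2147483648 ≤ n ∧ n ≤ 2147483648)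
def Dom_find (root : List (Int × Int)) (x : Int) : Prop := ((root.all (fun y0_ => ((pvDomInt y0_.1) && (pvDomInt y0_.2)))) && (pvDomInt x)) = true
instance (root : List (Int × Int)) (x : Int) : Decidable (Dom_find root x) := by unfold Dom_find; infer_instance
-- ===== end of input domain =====

-- B re-implements A's while-loop as a wrapper plus a structural recursion on the parent chain
-- (objective: simpler); equivalence is about the RETURN value — both Pythons mutate root only by
-- root[x] = x when x is initially absent, identically.

-- dict lookup root[x] / root.get(x): first match in the association list (none = KeyError / None)
def pvGetItem? (root : List (Int × Int)) (k : Int) : Option Int :=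
  (root.find? (fun p => p.1 == k)).map (·.2)

-- ===== PORT A =====
-- the while loop; fuel root.length + 1 suffices on every input Pre_find admits
-- (the fuel-0 and missing-key fallbacks are unreachable under Pre_find)
def findLoopA (root : List (Int × Int)) : Nat → Int → Int → Int → Int × Int
  | 0, x, _, n => (x, n)
  | fuel+1, x, val, n =>
    if x = val then (x, n)
    else
      match pvGetItem? root x with        -- x = root[x]
      | none => (x, n)                    -- KeyError: excluded by Pre_find
      | some x' =>
        match pvGetItem? root x' with     -- val = root[x]
        | none => (x', n)                 -- KeyError: excluded by Pre_find
        | some val' => findLoopA root fuel x' val' (n + 1)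

def find (root : List (Int × Int)) (x : Int) : Int × Int :=
  match pvGetItem? root x with            -- val = root.get(x)
  | none => (x, 0)                        -- root[x] = x; return x, 0
  | some val => findLoopA root (root.length + 1) x val 0

-- ===== PORT B =====
-- _walk: recursion on the chain; fuel root.length + 1 suffices under Pre_find
def walkB (root : List (Int × Int)) : Nat → Int → Int × Int
  | 0, x => (x, 0)
  | fuel+1, x =>
    match pvGetItem? root x with          -- val = root[x]
    | none => (x, 0)                      -- KeyError: excluded by Pre_find
    | some val =>
      if x = val then (x, 0)
      else
        let rn := walkB root fuel val     -- r, n = _walk(root, val)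
        (rn.1, rn.2 + 1)

def find_alt (root : List (Int × Int)) (x : Int) : Int × Int :=
  if root.any (fun p => p.1 == x) then    -- x not in root (negated)
    walkB root (root.length + 1) x
  else (x, 0)                             -- root[x] = x; return x, 0

-- ===== PRECONDITION & SPEC =====
-- chain iteration x, root[x], root[root[x]], … (none once a key is missing)
def pvIter? (root : List (Int × Int)) : Nat → Int → Option Int
  | 0, x => some x
  | n+1, x => (pvGetItem? root x).bind (pvIter? root n)

def pvIsFix (root : List (Int × Int)) : Option Int → Bool
  | some y => pvGetItem? root y == some y
  | none => false

-- exactly the inputs where Python A returns: either x is absent, or the orbit of x under the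
-- parent map reaches a self-parent (a union-find root) within root.length steps; otherwise A
-- raises KeyError (chain leaves the dict) or loops forever (a cycle). A terminating chain has
-- distinct nodes, so root.length bounds the orbit index; this is a property of the input's
-- functional graph, not a replay of either port (neither mutates, and no hop count appears).
def Pre_find (root : List (Int × Int)) (x : Int) : Prop :=
  pvGetItem? root x = none ∨ ∃ n < root.length + 1, pvIsFix root (pvIter? root n x) = true
instance (root : List (Int × Int)) (x : Int) : Decidable (Pre_find root x) := by
  unfold Pre_find; infer_instance

def pvWitness_find : (List (Int × Int)) × Int := ([(1, 2), (2, 2)], 1)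

def Spec_find (root : List (Int × Int)) (x : Int) (out : Int × Int) : Prop := out = find_alt root x
instance (root : List (Int × Int)) (x : Int) (out : Int × Int) : Decidable (Spec_find root x out) := by
  unfold Spec_find; infer_instance

-- ===== CLAIM (what is proved, stated in full; the proofs are below) =====
def Claim_equal_find : Prop := ∀ (root : List (Int × Int)) (x : Int), Dom_find root x → Pre_find root x → Spec_find root x (find root x)

-- ===== LEMMAS AND PROOFS =====

lemma loopA_eq_walkB (root : List (Int × Int)) :
    ∀ (fuel : Nat) (x val : Int) (n : Int),
      pvGetItem? root x = some val →
      (∃ N < fuel, pvIsFix root (pvIter? root N x) = true) →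
      findLoopA root fuel x val n = ((walkB root fuel x).1, n + (walkB root fuel x).2) := by
  intro fuel
  induction fuel with
  | zero => intro x val n _ h; obtain ⟨N, hN, _⟩ := h; omega
  | succ f ih =>
    intro x val n hx h
    obtain ⟨N, hNlt, hfix⟩ := h
    by_cases hxv : x = val
    · subst hxv; simp [findLoopA, walkB, hx]
    · -- N ≥ 1: a fixed point at 0 would force val = x
      cases N with
      | zero =>
        exfalso
        simp [pvIter?, pvIsFix, hx] at hfix
        exact hxv hfix.symm
      | succ M =>
        have hiter : pvIter? root (M + 1) x = pvIter? root M val := by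
          simp [pvIter?, hx]
        rw [hiter] at hfix
        -- the next lookup succeeds: otherwise the chain dies and no fixed point is reached
        obtain ⟨val', hval'⟩ : ∃ v, pvGetItem? root val = some v := by
          cases M with
          | zero =>
            simp [pvIter?, pvIsFix] at hfix
            exact ⟨val, by simpa using hfix⟩
          | succ K =>
            cases hv : pvGetItem? root val with
            | none => simp [pvIter?, pvIsFix, hv] at hfix
            | some v => exact ⟨v, rfl⟩
        have := ih val val' (n + 1) hval' ⟨M, by omega, hfix⟩
        simp only [findLoopA, walkB, hx, hval', if_neg hxv]
        rw [this]
        simp only [Prod.mk.injEq]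
        exact ⟨trivial, by ring⟩

lemma getItem_none_iff_not_any (root : List (Int × Int)) (x : Int) :
    pvGetItem? root x = none ↔ root.any (fun p => p.1 == x) = false := by
  simp [pvGetItem?, List.find?_eq_none, List.any_eq_false]

-- ===== VERDICT (by name: the statement is the Claim_ definition above) =====
theorem find_spec : Claim_equal_find := by
  intro root x _ hpre
  unfold Spec_find
  cases hx : pvGetItem? root x with
  | none =>
    simp [find, find_alt, hx, (getItem_none_iff_not_any root x).mp hx]
  | some val =>
    have hany : root.any (fun p => p.1 == x) = true := by
      cases h : root.any (fun p => p.1 == x)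
      · rw [(getItem_none_iff_not_any root x).mpr h] at hx; cases hx
      · rfl
    have hN : ∃ N < root.length + 1, pvIsFix root (pvIter? root N x) = true := by
      cases hpre with
      | inl h => rw [h] at hx; cases hx
      | inr h => exact h
    simp only [find, find_alt, hx, hany, if_true]
    rw [loopA_eq_walkB root (root.length + 1) x val 0 hx hN]
    simp
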